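-- pv_equiv track=rewrite | github.com/Pragya28/Competitive-Programming | LatinSquare.py | isLatinSquare
-- ===== SOURCE A (Python) =====
-- def isLatinSquare(lst):
--     n = len(lst)
--     syms = set(lst[0])
--     if len(syms) != n:
--         return False
--     for row in lst:
--         if set(row) != syms:
--             return False
--     newLst = [[lst[i][j] for i in range(n)] for j in range(n)]
--     for row in newLst:
--         if set(row) != syms:
--             return False
--     return True
-- ===== SOURCE B (Python) =====
-- def isLatinSquare(lst):
--     n = len(lst)
--     syms = set(lst[0])
--     if len(syms) != n:
--         return False
--     pairs = set()
--     for row in lst: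
--         if set(row) != syms:
--             return False
--         for j in range(n):
--             pairs.add((row[j], j))
--     return len(pairs) == n * n
-- ===== Notes on version B (the rewrite author's own statement) =====
-- stated objective: alternative
-- what changed: B drops the transpose and all per-column set comparisons: it collects one global set of (value, column-index) pairs during the row pass and decides by the single cardinality test len(pairs) == n*n, which holds iff every column is duplicate-free (and hence equals syms, since all entries lie in syms after the row checks).
import Mathlib
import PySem

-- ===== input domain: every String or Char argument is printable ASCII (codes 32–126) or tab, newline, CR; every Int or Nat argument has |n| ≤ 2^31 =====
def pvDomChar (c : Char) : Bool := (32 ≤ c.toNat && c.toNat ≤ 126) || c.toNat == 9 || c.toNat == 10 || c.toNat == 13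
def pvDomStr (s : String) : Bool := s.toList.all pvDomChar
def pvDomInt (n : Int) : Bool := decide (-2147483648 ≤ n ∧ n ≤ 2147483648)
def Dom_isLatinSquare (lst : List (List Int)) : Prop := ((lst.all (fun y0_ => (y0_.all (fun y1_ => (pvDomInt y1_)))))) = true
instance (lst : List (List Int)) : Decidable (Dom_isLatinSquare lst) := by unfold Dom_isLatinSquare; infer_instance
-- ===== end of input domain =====

-- B replaces A's transpose + per-column set comparisons by a single global set of
-- (value, column) pairs and one cardinality test len(pairs) == n*n (objective: alternative).

-- ===== PORT A =====
-- 'for row in rows: if set(row) != syms: return False' — shared by both of A's loops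
def pvCheckRows (syms : List Int) : List (List Int) → Bool
  | [] => true
  | row :: rest =>
    if PySem.Set.equal (PySem.Set.ofList row) syms then pvCheckRows syms rest else false

-- newLst = [[lst[i][j] for i in range(n)] for j in range(n)]
def pvTranspose (lst : List (List Int)) (n : Nat) : List (List Int) :=
  (List.range n).map (fun (j : Nat) =>
    (List.range n).map (fun (i : Nat) =>
      PySem.List.pyGetD (PySem.List.pyGetD lst (i : Int) []) (j : Int) 0))

def isLatinSquare (lst : List (List Int)) : Bool :=
  match PySem.List.pyGet? lst 0 with
  | none => false   -- Python raises IndexError on lst[0] here; excluded by Pre_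
  | some r0 =>
    if PySem.Set.len (PySem.Set.ofList r0) ≠ (lst.length : Int) then false
    else if pvCheckRows (PySem.Set.ofList r0) lst then
      pvCheckRows (PySem.Set.ofList r0) (pvTranspose lst lst.length)
    else false

-- ===== PORT B =====
-- inner 'for j in range(n): pairs.add((row[j], j))'
def pvAddRowPairs (n : Nat) (pairs : PySem.Set (Int × Int)) (row : List Int) :
    PySem.Set (Int × Int) :=
  (List.range n).foldl
    (fun s j => PySem.Set.add s (PySem.List.pyGetD row (j : Int) 0, (j : Int))) pairs

-- 'for row in lst: if set(row) != syms: return False; <add the row's pairs>' (none = early False)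
def pvPairLoop (syms : List Int) (n : Nat) (pairs : PySem.Set (Int × Int)) :
    List (List Int) → Option (PySem.Set (Int × Int))
  | [] => some pairs
  | row :: rest =>
    if PySem.Set.equal (PySem.Set.ofList row) syms then
      pvPairLoop syms n (pvAddRowPairs n pairs row) rest
    else none

def isLatinSquare_alt (lst : List (List Int)) : Bool :=
  match PySem.List.pyGet? lst 0 with
  | none => false   -- B's Python also raises IndexError on lst[0]; excluded by Pre_
  | some r0 =>
    if PySem.Set.len (PySem.Set.ofList r0) ≠ (lst.length : Int) then false
    else
      match pvPairLoop (PySem.Set.ofList r0) lst.length PySem.Set.empty lst with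
      | none => false
      | some pairs => PySem.Set.len pairs == (lst.length : Int) * (lst.length : Int)

-- ===== PRECONDITION & SPEC =====
-- Pre_ excludes only the empty list, on which the Python A raises IndexError at lst[0].
def Pre_isLatinSquare (lst : List (List Int)) : Prop := lst ≠ []
instance (lst : List (List Int)) : Decidable (Pre_isLatinSquare lst) := by
  unfold Pre_isLatinSquare; infer_instance

def pvWitness_isLatinSquare : List (List Int) := [[1, 2], [2, 1]]

def Spec_isLatinSquare (lst : List (List Int)) (out : Bool) : Prop := out = isLatinSquare_alt lst
instance (lst : List (List Int)) (out : Bool) : Decidable (Spec_isLatinSquare lst out) := by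
  unfold Spec_isLatinSquare; infer_instance

-- ===== CLAIM (what is proved, stated in full; the proofs are below) =====
def Claim_equal_isLatinSquare : Prop := ∀ (lst : List (List Int)), Dom_isLatinSquare lst → Pre_isLatinSquare lst → Spec_isLatinSquare lst (isLatinSquare lst)

-- ===== LEMMAS AND PROOFS =====

-- the j-th column of lst, exactly as A's transpose builds it
def pvCol (lst : List (List Int)) (j : Nat) : List Int :=
  (List.range lst.length).map (fun (i : Nat) =>
    PySem.List.pyGetD (PySem.List.pyGetD lst (i : Int) []) (j : Int) 0)

theorem pvCheckRows_eq_all (syms : List Int) (rows : List (List Int)) :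
    pvCheckRows syms rows = rows.all (fun row => PySem.Set.equal (PySem.Set.ofList row) syms) := by
  induction rows with
  | nil => rfl
  | cons row rest ih =>
    simp only [pvCheckRows, List.all_cons]
    split_ifs with h <;> simp [h, ih]

theorem pvPairLoop_eq (syms : List Int) (n : Nat) (pairs : PySem.Set (Int × Int))
    (rows : List (List Int)) :
    pvPairLoop syms n pairs rows =
      if rows.all (fun row => PySem.Set.equal (PySem.Set.ofList row) syms) then
        some (rows.foldl (pvAddRowPairs n) pairs)
      else none := by
  induction rows generalizing pairs with
  | nil => rfl
  | cons row rest ih =>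
    simp only [pvPairLoop, List.all_cons, List.foldl_cons]
    split_ifs with h <;> simp_all

theorem mem_pvAddRowPairs (n : Nat) (pairs : PySem.Set (Int × Int)) (row : List Int)
    (p : Int × Int) :
    p ∈ pvAddRowPairs n pairs row ↔
      p ∈ pairs ∨ ∃ j < n, p = (PySem.List.pyGetD row (j : Int) 0, (j : Int)) := by
  unfold pvAddRowPairs
  rw [PySem.Set.mem_foldl_add]
  simp

theorem nodup_pvAddRowPairs (n : Nat) (pairs : PySem.Set (Int × Int)) (row : List Int)
    (h : pairs.Nodup) : (pvAddRowPairs n pairs row).Nodup := by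
  unfold pvAddRowPairs
  induction (List.range n) generalizing pairs with
  | nil => exact h
  | cons j rest ih => exact ih _ (PySem.Set.nodup_add _ _ h)

theorem nodup_foldl_pvAddRowPairs (n : Nat) (rows : List (List Int))
    (pairs : PySem.Set (Int × Int)) (h : pairs.Nodup) :
    (rows.foldl (pvAddRowPairs n) pairs).Nodup := by
  induction rows generalizing pairs with
  | nil => exact h
  | cons row rest ih => exact ih _ (nodup_pvAddRowPairs n pairs row h)

theorem mem_foldl_pvAddRowPairs (n : Nat) (rows : List (List Int))
    (pairs : PySem.Set (Int × Int)) (p : Int × Int) :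
    p ∈ rows.foldl (pvAddRowPairs n) pairs ↔
      p ∈ pairs ∨ ∃ row ∈ rows, ∃ j < n, p = (PySem.List.pyGetD row (j : Int) 0, (j : Int)) := by
  induction rows generalizing pairs with
  | nil => simp
  | cons row rest ih =>
    simp only [List.foldl_cons]
    rw [ih, mem_pvAddRowPairs]
    constructor
    · rintro (⟨h | ⟨j, hj, rfl⟩⟩ | ⟨r, hr, j, hj, rfl⟩)
      · exact Or.inl h
      · exact Or.inr ⟨row, by simp, j, hj, rfl⟩
      · exact Or.inr ⟨r, by simp [hr], j, hj, rfl⟩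
    · rintro (h | ⟨r, hr, j, hj, rfl⟩)
      · exact Or.inl (Or.inl h)
      · rcases List.mem_cons.mp hr with rfl | hr
        · exact Or.inl (Or.inr ⟨j, hj, rfl⟩)
        · exact Or.inr ⟨r, hr, j, hj, rfl⟩

-- the members of B's pair set are exactly the pairs (x, j) with x in column j
theorem mem_pairs (lst : List (List Int)) (p : Int × Int) :
    p ∈ lst.foldl (pvAddRowPairs lst.length) PySem.Set.empty ↔
      ∃ j < lst.length, p.2 = (j : Int) ∧ p.1 ∈ pvCol lst j := by
  rw [mem_foldl_pvAddRowPairs]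
  simp only [PySem.Set.empty, List.not_mem_nil, false_or]
  constructor
  · rintro ⟨row, hr, j, hj, rfl⟩
    obtain ⟨i, hi, rfl⟩ := List.mem_iff_getElem.mp hr
    refine ⟨j, hj, rfl, ?_⟩
    unfold pvCol
    refine List.mem_map.mpr ⟨i, List.mem_range.mpr hi, ?_⟩
    have hrow : PySem.List.pyGetD lst (i : Int) [] = lst[i] := by
      rw [PySem.List.pyGetD_natCast, List.getD_eq_getElem _ _ hi]
    rw [hrow]
  · rintro ⟨j, hj, h2, h1⟩
    unfold pvCol at h1
    obtain ⟨i, hmem, hie⟩ := List.mem_map.mp h1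
    have hi := List.mem_range.mp hmem
    refine ⟨lst[i], List.getElem_mem hi, j, hj, ?_⟩
    have : PySem.List.pyGetD lst (i : Int) [] = lst[i] := by
      rw [PySem.List.pyGetD_natCast, List.getD_eq_getElem _ _ hi]
    rw [this] at hie
    obtain ⟨x, t⟩ := p
    simp only at h2 hie
    rw [h2, ← hie]

-- the flat list of the same pairs, column block by column block
def pvQ (lst : List (List Int)) : List (Int × Int) :=
  (List.range lst.length).flatMap (fun j =>
    (PySem.Set.ofList (pvCol lst j)).map (fun x => (x, (j : Int))))

theorem mem_pvQ (lst : List (List Int)) (p : Int × Int) :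
    p ∈ pvQ lst ↔ ∃ j < lst.length, p.2 = (j : Int) ∧ p.1 ∈ pvCol lst j := by
  unfold pvQ
  simp only [List.mem_flatMap, List.mem_range, List.mem_map]
  constructor
  · rintro ⟨j, hj, x, hx, rfl⟩
    exact ⟨j, hj, rfl, by rwa [PySem.Set.mem_ofList] at hx⟩
  · rintro ⟨j, hj, h2, h1⟩
    obtain ⟨x, t⟩ := p
    simp only at h2 h1
    exact ⟨j, hj, x, by rwa [PySem.Set.mem_ofList], by rw [h2]⟩

theorem nodup_pvQ (lst : List (List Int)) : (pvQ lst).Nodup := by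
  unfold pvQ
  rw [List.nodup_flatMap]
  constructor
  · intro j _
    exact (PySem.Set.nodup_ofList _).map (fun a b h => (Prod.mk.injEq .. ▸ h).1)
  · refine (List.nodup_range).pairwise_of_forall_ne ?_
    intro a _ b _ hab
    simp only [Function.onFun]
    intro p hpa hpb
    obtain ⟨xa, _, ha⟩ := List.mem_map.mp hpa
    obtain ⟨xb, _, hb⟩ := List.mem_map.mp hpb
    have h1 : p.2 = (a : Int) := by rw [← ha]
    have h2 : p.2 = (b : Int) := by rw [← hb]
    have : (a : Int) = (b : Int) := by rw [← h1, h2]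
    exact hab (by exact_mod_cast this)

theorem length_pvQ (lst : List (List Int)) :
    (pvQ lst).length =
      ((List.range lst.length).map (fun j => (PySem.Set.ofList (pvCol lst j)).length)).sum := by
  unfold pvQ
  rw [List.length_flatMap]
  congr 1
  simp

-- a list of naturals each ≤ n sums to (length * n) iff every entry is n
theorem sum_eq_iff_all_eq (l : List Nat) (n : Nat) (h : ∀ x ∈ l, x ≤ n) :
    l.sum = l.length * n ↔ ∀ x ∈ l, x = n := by
  induction l with
  | nil => simp
  | cons a rest ih =>
    have hrest : rest.sum ≤ rest.length * n := by
      have := List.sum_le_card_nsmul rest n (fun x hx => h x (by simp [hx]))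
      simpa [smul_eq_mul] using this
    have ha : a ≤ n := h a (by simp)
    have ihh := ih (fun x hx => h x (by simp [hx]))
    simp only [List.sum_cons, List.length_cons, List.forall_mem_cons]
    have hmul : (rest.length + 1) * n = n + rest.length * n := by ring
    rw [hmul]
    constructor
    · intro he
      have han : a = n ∧ rest.sum = rest.length * n := by constructor <;> omega
      exact ⟨han.1, ihh.mp han.2⟩
    · rintro ⟨rfl, hall⟩
      rw [ihh.mpr hall]

-- set-equality with syms for a nodup subset of syms is exactly a length test
theorem equal_iff_length (col syms : List Int) (hcn : col.Nodup) (hsn : syms.Nodup)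
    (hsub : col ⊆ syms) :
    PySem.Set.equal col syms = true ↔ col.length = syms.length := by
  constructor
  · intro h
    have hperm : col.Perm syms :=
      (List.perm_ext_iff_of_nodup hcn hsn).mpr (PySem.Set.equal_iff col syms |>.mp h)
    exact hperm.length_eq
  · intro h
    have hsp : col.Subperm syms := hcn.subperm hsub
    have hperm : col.Perm syms := hsp.perm_of_length_le (le_of_eq h.symm)
    exact (PySem.Set.equal_iff col syms).mpr (fun x => hperm.mem_iff)

-- ===== MAIN ARGUMENT =====
theorem main_eq (lst : List (List Int)) (r0 : List Int)
    (hlen : PySem.Set.len (PySem.Set.ofList r0) = (lst.length : Int))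
    (hrows : ∀ row ∈ lst, PySem.Set.equal (PySem.Set.ofList row) (PySem.Set.ofList r0) = true) :
    pvCheckRows (PySem.Set.ofList r0) (pvTranspose lst lst.length) =
      (PySem.Set.len (lst.foldl (pvAddRowPairs lst.length) PySem.Set.empty)
        == (lst.length : Int) * (lst.length : Int)) := by
  set n := lst.length with hn
  set syms := PySem.Set.ofList r0 with hsyms
  have hsn : syms.Nodup := PySem.Set.nodup_ofList r0
  have hslen : syms.length = n := by
    have : (syms.length : Int) = (n : Int) := hlen
    exact_mod_cast this
  -- every column is a subset of syms
  have hcolsub : ∀ j < n, pvCol lst j ⊆ syms := by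
    intro j hj x hx
    unfold pvCol at hx
    obtain ⟨i, hmem, hie⟩ := List.mem_map.mp hx
    have hi := List.mem_range.mp hmem
    have hrow : PySem.List.pyGetD lst (i : Int) [] = lst[i] := by
      rw [PySem.List.pyGetD_natCast, List.getD_eq_getElem _ _ hi]
    rw [hrow] at hie
    set row := lst[i] with hrdef
    have hre : PySem.Set.equal (PySem.Set.ofList row) syms = true :=
      hrows row (List.getElem_mem hi)
    -- row has at least n entries: its n distinct symbols force length ≥ n
    have hper : (PySem.Set.ofList row).Perm syms :=
      (List.perm_ext_iff_of_nodup (PySem.Set.nodup_ofList row) hsn).mpr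
        ((PySem.Set.equal_iff _ _).mp hre)
    have hrl : n ≤ row.length := by
      have h1 : (PySem.Set.ofList row).length = n := by rw [hper.length_eq, hslen]
      have h2 := PySem.Set.length_ofList_le row
      omega
    have hjr : j < row.length := lt_of_lt_of_le hj hrl
    have : PySem.List.pyGetD row (j : Int) 0 = row[j] := by
      rw [PySem.List.pyGetD_natCast, List.getD_eq_getElem _ _ hjr]
    rw [this] at hie
    have hxin : x ∈ row := hie ▸ List.getElem_mem hjr
    exact ((PySem.Set.equal_iff _ _).mp hre x).mp ((PySem.Set.mem_ofList _ _).mpr hxin)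
  -- A's second check, as a Prop
  rw [pvCheckRows_eq_all]
  have hA : (pvTranspose lst n).all
      (fun row => PySem.Set.equal (PySem.Set.ofList row) syms) = true ↔
      ∀ j < n, (PySem.Set.ofList (pvCol lst j)).length = n := by
    have ht : pvTranspose lst n = (List.range n).map (fun j => pvCol lst j) := rfl
    rw [ht, List.all_map, List.all_eq_true]
    simp only [Function.comp_apply]
    constructor
    · intro h j hj
      have := h j (List.mem_range.mpr hj)
      have he := (equal_iff_length _ _ (PySem.Set.nodup_ofList _) hsn
        (fun x hx => hcolsub j hj ((PySem.Set.mem_ofList _ _).mp hx))).mp this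
      rw [he, hslen]
    · intro h j hmem
      have hj := List.mem_range.mp hmem
      exact (equal_iff_length _ _ (PySem.Set.nodup_ofList _) hsn
        (fun x hx => hcolsub j hj ((PySem.Set.mem_ofList _ _).mp hx))).mpr (by rw [h j hj, hslen])
  -- B's cardinality check, as the same Prop
  set P := lst.foldl (pvAddRowPairs n) PySem.Set.empty with hP
  have hPn : P.Nodup := nodup_foldl_pvAddRowPairs n lst _ (by simp [PySem.Set.empty])
  have hPperm : P.Perm (pvQ lst) :=
    (List.perm_ext_iff_of_nodup hPn (nodup_pvQ lst)).mpr
      (fun p => (mem_pairs lst p).trans (mem_pvQ lst p).symm)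
  have hPlen : P.length =
      ((List.range n).map (fun j => (PySem.Set.ofList (pvCol lst j)).length)).sum := by
    rw [hPperm.length_eq, length_pvQ]
  have hB : (PySem.Set.len P == (n : Int) * (n : Int)) = true ↔
      ∀ j < n, (PySem.Set.ofList (pvCol lst j)).length = n := by
    have hbound : ∀ x ∈ (List.range n).map (fun j => (PySem.Set.ofList (pvCol lst j)).length),
        x ≤ n := by
      intro x hx
      obtain ⟨j, _, rfl⟩ := List.mem_map.mp hx
      calc (PySem.Set.ofList (pvCol lst j)).length ≤ (pvCol lst j).length :=
            PySem.Set.length_ofList_le _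
        _ = n := by unfold pvCol; simp [← hn]
    have hiff := sum_eq_iff_all_eq _ n hbound
    rw [List.length_map, List.length_range] at hiff
    constructor
    · intro h j hj
      have hPval : PySem.Set.len P = (n : Int) * (n : Int) := eq_of_beq h
      have hPlen2 : P.length = n * n := by
        have : (P.length : Int) = (n : Int) * (n : Int) := by
          simpa [PySem.Set.len] using hPval
        exact_mod_cast this
      rw [hPlen] at hPlen2
      exact hiff.mp hPlen2 _ (List.mem_map.mpr ⟨j, List.mem_range.mpr hj, rfl⟩)
    · intro h
      have hPlen2 : P.length = n * n := by
        rw [hPlen]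
        refine hiff.mpr ?_
        intro x hx
        obtain ⟨j, hjm, rfl⟩ := List.mem_map.mp hx
        exact h j (List.mem_range.mp hjm)
      have hx : PySem.Set.len P = (n : Int) * (n : Int) := by
        have hc := congrArg (fun m : Nat => (m : Int)) hPlen2
        push_cast at hc
        simpa [PySem.Set.len] using hc
      rw [hx]
      simp
  rw [Bool.eq_iff_iff, hA, hB]

-- ===== VERDICT (by name: the statement is the Claim_ definition above) =====
theorem isLatinSquare_spec : Claim_equal_isLatinSquare := by
  intro lst _ _
  unfold Spec_isLatinSquare isLatinSquare isLatinSquare_alt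
  cases hg : PySem.List.pyGet? lst 0 with
  | none => rfl
  | some r0 =>
    dsimp only
    by_cases hlen : PySem.Set.len (PySem.Set.ofList r0) ≠ (lst.length : Int)
    · rw [if_pos hlen, if_pos hlen]
    · rw [if_neg hlen, if_neg hlen, pvPairLoop_eq]
      by_cases hrows :
          lst.all (fun row => PySem.Set.equal (PySem.Set.ofList row) (PySem.Set.ofList r0)) = true
      · rw [if_pos hrows]
        dsimp only
        have hc : pvCheckRows (PySem.Set.ofList r0) lst = true := by
          rw [pvCheckRows_eq_all]; exact hrows
        simp only [hc, if_true]
        exact main_eq lst r0 (not_not.mp hlen) (fun row hr => (List.all_eq_true.mp hrows) row hr)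
      · rw [if_neg hrows]
        have hc : pvCheckRows (PySem.Set.ofList r0) lst = false := by
          rw [pvCheckRows_eq_all]; exact Bool.not_eq_true _ ▸ (by simpa using hrows)
        simp [hc]
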